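-- pv_equiv track=rewrite | github.com/Scientific-Computing-Lab/AdarEdit | Script/model/bioaware_gnn.py | stem_loop_geometry
-- ===== SOURCE A (Python) =====
-- from typing import Dict, List, Tuple
--
-- def paired_map(struct: str) -> Dict[int, int]:
--     stack, pm = [], {}
--     for i, c in enumerate(struct):
--         if c == "(":
--             stack.append(i)
--         elif c == ")" and stack:
--             j = stack.pop()
--             pm[i] = j
--             pm[j] = i
--     return pm
--
-- def stem_loop_geometry(struct: str) -> Tuple[List[int], List[int], List[int]]:
--     n = len(struct)
--     pm = paired_map(struct)
--     stem_len = [0] * n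
--     loop_len = [0] * n
--     dist_junc = [0] * n
--
--     for i in range(n):
--         if i in pm:
--             l = i
--             while l - 1 >= 0 and (l - 1) in pm and pm.get(l - 1, -10) == pm.get(l, -10) - 1:
--                 l -= 1
--             r = i
--             while r + 1 < n and (r + 1) in pm and pm.get(r + 1, -10) == pm.get(r, -10) + 1:
--                 r += 1
--             stem_len[i] = r - l + 1
--         else:
--             l = i
--             while l - 1 >= 0 and struct[l - 1] == ".":
--                 l -= 1
--             r = i
--             while r + 1 < n and struct[r + 1] == ".":
--                 r += 1
--             loop_len[i] = r - l + 1
--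
--         # distance to junction (change between paired/unpaired)
--         d_left = 0
--         j = i
--         while j > 0 and struct[j] == struct[j - 1]:
--             j -= 1
--             d_left += 1
--         d_right = 0
--         j = i
--         while j < n - 1 and struct[j] == struct[j + 1]:
--             j += 1
--             d_right += 1
--         dist_junc[i] = min(d_left, d_right)
--     return stem_len, loop_len, dist_junc
-- ===== SOURCE B (Python) =====
-- def stem_loop_geometry(struct):
--     n = len(struct)
--     pm = {}
--     stack = []
--     for i, c in enumerate(struct):
--         if c == "(":
--             stack.append(i)
--         elif c == ")" and stack:
--             j = stack.pop()
--             pm[i] = j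
--             pm[j] = i
--
--     def adj(i):
--         # the stem run of paired positions continues from position i-1 to position i
--         return (i - 1) in pm and i in pm and pm[i - 1] == pm[i] - 1
--
--     # one left-to-right pass: lengths of the runs ending just before/at each position
--     sL, dotL, eqL = [], [], []
--     s = d = e = 0
--     for i in range(n):
--         if i > 0:
--             s = s + 1 if adj(i) else 0
--             d = d + 1 if struct[i - 1] == "." else 0
--             e = e + 1 if struct[i] == struct[i - 1] else 0
--         sL.append(s)
--         dotL.append(d)
--         eqL.append(e)
--
--     # one right-to-left pass (collected right-to-left, then reversed)
--     sR, dotR, eqR = [], [], []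
--     s = d = e = 0
--     for k in range(n):
--         i = n - 1 - k
--         if i < n - 1:
--             s = s + 1 if adj(i + 1) else 0
--             d = d + 1 if struct[i + 1] == "." else 0
--             e = e + 1 if struct[i] == struct[i + 1] else 0
--         sR.append(s)
--         dotR.append(d)
--         eqR.append(e)
--     sR.reverse()
--     dotR.reverse()
--     eqR.reverse()
--
--     stem_len = [sL[i] + sR[i] + 1 if i in pm else 0 for i in range(n)]
--     loop_len = [0 if i in pm else dotL[i] + dotR[i] + 1 for i in range(n)]
--     dist_junc = [min(eqL[i], eqR[i]) for i in range(n)]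
--     return stem_len, loop_len, dist_junc
-- ===== Notes on version B (the rewrite author's own statement) =====
-- stated objective: faster
-- what changed: A rescans left and right from every position (quadratic); B segments all runs in two linear passes (left-to-right and right-to-left running run-length counters) and assembles each answer from the precomputed counts.
import Mathlib
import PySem

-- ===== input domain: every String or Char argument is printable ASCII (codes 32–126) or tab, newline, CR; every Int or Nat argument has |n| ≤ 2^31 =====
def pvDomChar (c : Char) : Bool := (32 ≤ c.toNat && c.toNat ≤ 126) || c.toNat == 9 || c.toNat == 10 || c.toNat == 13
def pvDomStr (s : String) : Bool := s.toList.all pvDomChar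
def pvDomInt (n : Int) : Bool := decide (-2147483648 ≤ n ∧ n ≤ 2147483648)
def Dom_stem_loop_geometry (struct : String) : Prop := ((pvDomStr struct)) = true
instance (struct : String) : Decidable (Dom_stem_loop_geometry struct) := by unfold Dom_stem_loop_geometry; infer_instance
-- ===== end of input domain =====

-- B replaces A's per-position left/right rescans by two linear run-length passes; same return value, proved below.

-- ===== PORT A =====

-- paired_map: stack-based matching of '(' / ')'
def pvPairedMap (struct : String) : PySem.Dict Int Int :=
  ((PySem.List.enumerate struct.toList 0).foldl
    (fun (st : List Int × PySem.Dict Int Int) ic =>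
      if ic.2 = '(' then (ic.1 :: st.1, st.2)
      else if ic.2 = ')' then
        match st.1 with
        | [] => st
        | j :: rest => (rest, (st.2.insert ic.1 j).insert j ic.1)
      else st)
    ([], PySem.Dict.empty)).2

-- while l-1 >= 0 and (l-1) in pm and pm.get(l-1,-10) == pm.get(l,-10) - 1: l -= 1
def pvWhileStemL (pm : PySem.Dict Int Int) (l : Int) : Int :=
  if h : 0 ≤ l - 1 ∧ (pm.get? (l - 1)).isSome ∧ pm.getD (l - 1) (-10) = pm.getD l (-10) - 1 then
    pvWhileStemL pm (l - 1)
  else l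
termination_by l.toNat
decreasing_by obtain ⟨h1, -⟩ := h; omega

-- while r+1 < n and (r+1) in pm and pm.get(r+1,-10) == pm.get(r,-10) + 1: r += 1
def pvWhileStemR (pm : PySem.Dict Int Int) (n : Int) (r : Int) : Int :=
  if h : r + 1 < n ∧ (pm.get? (r + 1)).isSome ∧ pm.getD (r + 1) (-10) = pm.getD r (-10) + 1 then
    pvWhileStemR pm n (r + 1)
  else r
termination_by (n - r).toNat
decreasing_by obtain ⟨h1, -⟩ := h; omega

-- while l-1 >= 0 and struct[l-1] == ".": l -= 1
def pvWhileDotL (cs : List Char) (l : Int) : Int :=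
  if h : 0 ≤ l - 1 ∧ PySem.List.pyGet? cs (l - 1) = some '.' then
    pvWhileDotL cs (l - 1)
  else l
termination_by l.toNat
decreasing_by obtain ⟨h1, -⟩ := h; omega

-- while r+1 < n and struct[r+1] == ".": r += 1
def pvWhileDotR (cs : List Char) (n : Int) (r : Int) : Int :=
  if h : r + 1 < n ∧ PySem.List.pyGet? cs (r + 1) = some '.' then
    pvWhileDotR cs n (r + 1)
  else r
termination_by (n - r).toNat
decreasing_by obtain ⟨h1, -⟩ := h; omega

-- d_left: while j > 0 and struct[j] == struct[j-1]: j -= 1; d_left += 1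
def pvCntEqL (cs : List Char) (j : Int) : Int :=
  if h : 0 < j ∧ PySem.List.pyGet? cs j = PySem.List.pyGet? cs (j - 1) then
    pvCntEqL cs (j - 1) + 1
  else 0
termination_by j.toNat
decreasing_by obtain ⟨h1, -⟩ := h; omega

-- d_right: while j < n-1 and struct[j] == struct[j+1]: j += 1; d_right += 1
def pvCntEqR (cs : List Char) (n : Int) (j : Int) : Int :=
  if h : j < n - 1 ∧ PySem.List.pyGet? cs j = PySem.List.pyGet? cs (j + 1) then
    pvCntEqR cs n (j + 1) + 1
  else 0
termination_by (n - j).toNat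
decreasing_by obtain ⟨h1, -⟩ := h; omega

def stem_loop_geometry (struct : String) : List Int × List Int × List Int :=
  let cs := struct.toList
  let n : Int := cs.length
  let pm := pvPairedMap struct
  (PySem.List.pyRange 0 n 1).foldl
    (fun acc i =>
      let sv : Int := if pm.contains i then
          pvWhileStemR pm n i - pvWhileStemL pm i + 1 else 0
      let lv : Int := if pm.contains i then 0 else
          pvWhileDotR cs n i - pvWhileDotL cs i + 1
      let dv : Int := min (pvCntEqL cs i) (pvCntEqR cs n i)
      (acc.1 ++ [sv], acc.2.1 ++ [lv], acc.2.2 ++ [dv]))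
    (([] : List Int), ([] : List Int), ([] : List Int))

-- ===== PORT B =====

-- B builds pm with the same stack loop as A
def pvPairedMapAlt (struct : String) : PySem.Dict Int Int :=
  ((PySem.List.enumerate struct.toList 0).foldl
    (fun (st : List Int × PySem.Dict Int Int) ic =>
      if ic.2 = '(' then (ic.1 :: st.1, st.2)
      else if ic.2 = ')' then
        match st.1 with
        | [] => st
        | j :: rest => (rest, (st.2.insert ic.1 j).insert j ic.1)
      else st)
    ([], PySem.Dict.empty)).2

-- adj(i): the pm lookups are guarded by the memberships, so getD is exact here
def pvAdj (pm : PySem.Dict Int Int) (i : Int) : Bool :=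
  pm.contains (i - 1) && pm.contains i && (pm.getD (i - 1) 0 == pm.getD i 0 - 1)

-- body of B's left-to-right pass (running counters s, d, e; appends to the three lists)
def pvStepL (cs : List Char) (pm : PySem.Dict Int Int)
    (st : (Int × Int × Int) × (List Int × List Int × List Int)) (i : Int) :
    (Int × Int × Int) × (List Int × List Int × List Int) :=
  let s := if 0 < i then (if pvAdj pm i then st.1.1 + 1 else 0) else st.1.1
  let d := if 0 < i then (if PySem.List.pyGet? cs (i - 1) = some '.' then st.1.2.1 + 1 else 0) else st.1.2.1
  let e := if 0 < i then (if PySem.List.pyGet? cs i = PySem.List.pyGet? cs (i - 1) then st.1.2.2 + 1 else 0) else st.1.2.2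
  ((s, d, e), (st.2.1 ++ [s], st.2.2.1 ++ [d], st.2.2.2 ++ [e]))

-- body of B's right-to-left pass (k-th iteration works at position i = n-1-k)
def pvStepR (cs : List Char) (pm : PySem.Dict Int Int) (n : Int)
    (st : (Int × Int × Int) × (List Int × List Int × List Int)) (k : Int) :
    (Int × Int × Int) × (List Int × List Int × List Int) :=
  let i := n - 1 - k
  let s := if i < n - 1 then (if pvAdj pm (i + 1) then st.1.1 + 1 else 0) else st.1.1
  let d := if i < n - 1 then (if PySem.List.pyGet? cs (i + 1) = some '.' then st.1.2.1 + 1 else 0) else st.1.2.1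
  let e := if i < n - 1 then (if PySem.List.pyGet? cs i = PySem.List.pyGet? cs (i + 1) then st.1.2.2 + 1 else 0) else st.1.2.2
  ((s, d, e), (st.2.1 ++ [s], st.2.2.1 ++ [d], st.2.2.2 ++ [e]))

def stem_loop_geometry_alt (struct : String) : List Int × List Int × List Int :=
  let cs := struct.toList
  let n : Int := cs.length
  let pm := pvPairedMapAlt struct
  let L := (PySem.List.pyRange 0 n 1).foldl (pvStepL cs pm) ((0, 0, 0), ([], [], []))
  let R := (PySem.List.pyRange 0 n 1).foldl (pvStepR cs pm n) ((0, 0, 0), ([], [], []))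
  let sL := L.2.1
  let dotL := L.2.2.1
  let eqL := L.2.2.2
  let sR := R.2.1.reverse
  let dotR := R.2.2.1.reverse
  let eqR := R.2.2.2.reverse
  ((PySem.List.pyRange 0 n 1).map (fun i =>
      if pm.contains i then PySem.List.pyGetD sL i 0 + PySem.List.pyGetD sR i 0 + 1 else 0),
   (PySem.List.pyRange 0 n 1).map (fun i =>
      if pm.contains i then 0 else PySem.List.pyGetD dotL i 0 + PySem.List.pyGetD dotR i 0 + 1),
   (PySem.List.pyRange 0 n 1).map (fun i =>
      min (PySem.List.pyGetD eqL i 0) (PySem.List.pyGetD eqR i 0)))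

-- ===== PRECONDITION & SPEC =====
def Spec_stem_loop_geometry (struct : String) (out : List Int × List Int × List Int) : Prop := out = stem_loop_geometry_alt struct
instance (struct : String) (out : List Int × List Int × List Int) : Decidable (Spec_stem_loop_geometry struct out) := by unfold Spec_stem_loop_geometry; infer_instance

-- ===== CLAIM (what is proved, stated in full; the proofs are below) =====
def Claim_equal_stem_loop_geometry : Prop := ∀ (struct : String), Dom_stem_loop_geometry struct → Spec_stem_loop_geometry struct (stem_loop_geometry struct)

-- ===== LEMMAS AND PROOFS =====

theorem pvPairedMapAlt_eq (struct : String) : pvPairedMapAlt struct = pvPairedMap struct := rfl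

-- run length of the maximal predicate-run ending at position k (scanning leftwards)
def pvRunL (p : Int → Bool) : Nat → Int
  | 0 => 0
  | k + 1 => if p ((k : Int) + 1) then pvRunL p k + 1 else 0

-- run length of the maximal predicate-run starting at position n-1-k (scanning rightwards)
def pvRunR (p : Int → Bool) (n : Int) : Nat → Int
  | 0 => 0
  | k + 1 => if p (n - 1 - (k : Int)) then pvRunR p n k + 1 else 0

theorem pvPM_aux (n : Int) (L : List (Int × Char)) (st : List Int × PySem.Dict Int Int)
    (hL : ∀ p ∈ L, 0 ≤ p.1 ∧ p.1 < n)
    (hstack : ∀ x ∈ st.1, 0 ≤ x ∧ x < n)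
    (hd : ∀ k v, st.2.get? k = some v → 0 ≤ k ∧ k < n ∧ 0 ≤ v ∧ v < n) :
    (∀ x ∈ (L.foldl
      (fun (st : List Int × PySem.Dict Int Int) ic =>
        if ic.2 = '(' then (ic.1 :: st.1, st.2)
        else if ic.2 = ')' then
          match st.1 with
          | [] => st
          | j :: rest => (rest, (st.2.insert ic.1 j).insert j ic.1)
        else st) st).1, 0 ≤ x ∧ x < n) ∧
    (∀ k v, ((L.foldl
      (fun (st : List Int × PySem.Dict Int Int) ic =>
        if ic.2 = '(' then (ic.1 :: st.1, st.2)
        else if ic.2 = ')' then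
          match st.1 with
          | [] => st
          | j :: rest => (rest, (st.2.insert ic.1 j).insert j ic.1)
        else st) st).2.get? k = some v → 0 ≤ k ∧ k < n ∧ 0 ≤ v ∧ v < n)) := by
  induction L generalizing st with
  | nil => exact ⟨hstack, hd⟩
  | cons p L ih =>
    obtain ⟨i, c⟩ := p
    obtain ⟨stack, d⟩ := st
    have hL' : ∀ q ∈ L, 0 ≤ q.1 ∧ q.1 < n := fun q hq => hL q (by simp [hq])
    obtain ⟨hi1, hi2⟩ : 0 ≤ i ∧ i < n := hL (i, c) (by simp)
    rw [List.foldl_cons]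
    by_cases h1 : c = '('
    · simp only [h1, reduceIte]
      refine ih _ hL' ?_ hd
      intro x hx
      rcases List.mem_cons.1 hx with rfl | h
      · exact ⟨hi1, hi2⟩
      · exact hstack x h
    · by_cases h2 : c = ')'
      · subst h2
        cases stack with
        | nil =>
          simp only [h1, reduceIte]
          exact ih _ hL' hstack hd
        | cons j rest =>
          have hj := hstack j (by simp)
          simp only [h1, reduceIte]
          refine ih _ hL' (fun x hx => hstack x (by simp [hx])) ?_
          intro k v hv
          rw [PySem.Dict.get?_insert, PySem.Dict.get?_insert] at hv
          by_cases e1 : k = j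
          · rw [if_pos e1] at hv
            cases hv
            exact ⟨e1 ▸ hj.1, e1 ▸ hj.2, hi1, hi2⟩
          · rw [if_neg e1] at hv
            by_cases e2 : k = i
            · rw [if_pos e2] at hv
              cases hv
              exact ⟨e2 ▸ hi1, e2 ▸ hi2, hj.1, hj.2⟩
            · rw [if_neg e2] at hv
              exact hd k v hv
      · simp only [h1, h2, reduceIte]
        exact ih _ hL' hstack hd

theorem pvPM_bound (struct : String) (k v : Int)
    (h : (pvPairedMap struct).get? k = some v) :
    0 ≤ k ∧ k < struct.toList.length ∧ 0 ≤ v ∧ v < struct.toList.length := by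
  refine (pvPM_aux struct.toList.length (PySem.List.enumerate struct.toList 0)
    ([], PySem.Dict.empty) ?_ (by simp) (by simp [PySem.Dict.get?_empty])).2 k v h
  intro p hp
  rw [PySem.List.mem_enumerate_iff] at hp
  obtain ⟨j, hj, rfl⟩ := hp
  refine ⟨by simp, ?_⟩
  simp only [zero_add]
  exact_mod_cast hj

theorem pvCondL_iff (pm : PySem.Dict Int Int)
    (hb : ∀ k v, pm.get? k = some v → 0 ≤ k ∧ 0 ≤ v) (l : Int) :
    (0 ≤ l - 1 ∧ (pm.get? (l - 1)).isSome ∧ pm.getD (l - 1) (-10) = pm.getD l (-10) - 1)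
      ↔ pvAdj pm l = true := by
  constructor
  · rintro ⟨h0, hs, he⟩
    cases hv : pm.get? (l - 1) with
    | none => rw [hv] at hs; simp at hs
    | some v =>
      have hv0 := (hb _ _ hv).2
      cases hw : pm.get? l with
      | none =>
        rw [PySem.Dict.getD_eq_get?_getD, PySem.Dict.getD_eq_get?_getD, hv, hw] at he
        simp at he; omega
      | some w =>
        rw [PySem.Dict.getD_eq_get?_getD, PySem.Dict.getD_eq_get?_getD, hv, hw] at he
        simp only [Option.getD_some] at he
        simp [pvAdj, PySem.Dict.contains_eq_isSome_get?, hv, hw,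
          PySem.Dict.getD_eq_get?_getD, he]
  · intro h
    simp only [pvAdj, Bool.and_eq_true, beq_iff_eq] at h
    obtain ⟨⟨hc1, hc2⟩, he⟩ := h
    rw [PySem.Dict.contains_eq_isSome_get?] at hc1 hc2
    cases hv : pm.get? (l - 1) with
    | none => rw [hv] at hc1; simp at hc1
    | some v =>
      cases hw : pm.get? l with
      | none => rw [hw] at hc2; simp at hc2
      | some w =>
        rw [PySem.Dict.getD_eq_get?_getD, PySem.Dict.getD_eq_get?_getD, hv, hw] at he
        simp only [Option.getD_some] at he
        refine ⟨(hb _ _ hv).1, by simp, ?_⟩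
        rw [PySem.Dict.getD_eq_get?_getD, PySem.Dict.getD_eq_get?_getD, hv, hw]
        simpa using he

theorem pvCondR_iff (pm : PySem.Dict Int Int) (n : Int)
    (hb : ∀ k v, pm.get? k = some v → 0 ≤ k ∧ 0 ≤ v ∧ k < n) (r : Int) :
    (r + 1 < n ∧ (pm.get? (r + 1)).isSome ∧ pm.getD (r + 1) (-10) = pm.getD r (-10) + 1)
      ↔ pvAdj pm (r + 1) = true := by
  have harith : r + 1 - 1 = r := by ring
  constructor
  · rintro ⟨h0, hs, he⟩
    cases hv : pm.get? (r + 1) with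
    | none => rw [hv] at hs; simp at hs
    | some v =>
      have hv0 := (hb _ _ hv).2.1
      cases hw : pm.get? r with
      | none =>
        rw [PySem.Dict.getD_eq_get?_getD, PySem.Dict.getD_eq_get?_getD, hv, hw] at he
        simp at he; omega
      | some w =>
        rw [PySem.Dict.getD_eq_get?_getD, PySem.Dict.getD_eq_get?_getD, hv, hw] at he
        simp only [Option.getD_some] at he
        simp [pvAdj, PySem.Dict.contains_eq_isSome_get?, harith, hv, hw,
          PySem.Dict.getD_eq_get?_getD, he]
  · intro h
    simp only [pvAdj, harith, Bool.and_eq_true, beq_iff_eq] at h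
    obtain ⟨⟨hc1, hc2⟩, he⟩ := h
    rw [PySem.Dict.contains_eq_isSome_get?] at hc1 hc2
    cases hw : pm.get? r with
    | none => rw [hw] at hc1; simp at hc1
    | some w =>
      cases hv : pm.get? (r + 1) with
      | none => rw [hv] at hc2; simp at hc2
      | some v =>
        rw [PySem.Dict.getD_eq_get?_getD, PySem.Dict.getD_eq_get?_getD, hw, hv] at he
        simp only [Option.getD_some] at he
        refine ⟨(hb _ _ hv).2.2, by simp, ?_⟩
        rw [PySem.Dict.getD_eq_get?_getD, PySem.Dict.getD_eq_get?_getD, hv, hw]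
        simp; omega

theorem pvWhileStemL_eq (pm : PySem.Dict Int Int)
    (hb : ∀ k v, pm.get? k = some v → 0 ≤ k ∧ 0 ≤ v) (k : Nat) :
    pvWhileStemL pm k = (k : Int) - pvRunL (pvAdj pm) k := by
  induction k with
  | zero =>
    rw [pvWhileStemL]
    split_ifs with h
    · exfalso; have := h.1; omega
    · simp [pvRunL]
  | succ k ih =>
    have hcast : ((k + 1 : Nat) : Int) = (k : Int) + 1 := by push_cast; ring
    rw [pvWhileStemL, hcast]
    have h1 : (k : Int) + 1 - 1 = (k : Int) := by ring
    split_ifs with h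
    · have hp := (pvCondL_iff pm hb ((k : Int) + 1)).mp h
      rw [h1, ih]
      simp [pvRunL, hp]
    · have hp : ¬ pvAdj pm ((k : Int) + 1) = true :=
        fun hp => h ((pvCondL_iff pm hb ((k : Int) + 1)).mpr hp)
      simp [pvRunL, hp]

theorem pvWhileDotL_eq (cs : List Char) (k : Nat) :
    pvWhileDotL cs k = (k : Int) - pvRunL (fun i => PySem.List.pyGet? cs (i - 1) == some '.') k := by
  induction k with
  | zero =>
    rw [pvWhileDotL]
    split_ifs with h
    · exfalso; have := h.1; omega
    · simp [pvRunL]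
  | succ k ih =>
    have hcast : ((k + 1 : Nat) : Int) = (k : Int) + 1 := by push_cast; ring
    rw [pvWhileDotL, hcast]
    have h1 : (k : Int) + 1 - 1 = (k : Int) := by ring
    split_ifs with h
    · have hp : PySem.List.pyGet? cs ((k : Int) + 1 - 1) = some '.' := h.2
      rw [h1] at hp
      rw [h1, ih]
      simp [pvRunL, hp]
    · have hp : ¬ PySem.List.pyGet? cs ((k : Int)) = some '.' := by
        intro hp; exact h ⟨by omega, by rw [h1]; exact hp⟩
      simp at hp
      simp [pvRunL, h1, hp]

theorem pvCntEqL_eq (cs : List Char) (k : Nat) :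
    pvCntEqL cs k = pvRunL (fun i => PySem.List.pyGet? cs i == PySem.List.pyGet? cs (i - 1)) k := by
  induction k with
  | zero =>
    rw [pvCntEqL]
    split_ifs with h
    · exfalso; have := h.1; omega
    · simp [pvRunL]
  | succ k ih =>
    have hcast : ((k + 1 : Nat) : Int) = (k : Int) + 1 := by push_cast; ring
    rw [pvCntEqL, hcast]
    have h1 : (k : Int) + 1 - 1 = (k : Int) := by ring
    split_ifs with h
    · have hp := h.2
      rw [h1] at hp
      rw [h1, ih]
      simp [pvRunL, hp]
    · have hp : ¬ PySem.List.pyGet? cs ((k : Int) + 1) = PySem.List.pyGet? cs ((k : Int)) := by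
        intro hp; exact h ⟨by omega, by rw [h1]; exact hp⟩
      simp only [pvRunL, beq_iff_eq, h1]
      rw [if_neg hp]

theorem pvWhileStemR_eq (pm : PySem.Dict Int Int) (n : Nat)
    (hb : ∀ k v, pm.get? k = some v → 0 ≤ k ∧ 0 ≤ v ∧ k < (n : Int)) (k : Nat) (hk : k < n) :
    pvWhileStemR pm n ((n : Int) - 1 - k) = ((n : Int) - 1 - k) + pvRunR (pvAdj pm) n k := by
  induction k with
  | zero =>
    rw [pvWhileStemR]
    split_ifs with h
    · exfalso; have := h.1; push_cast at this; omega
    · simp [pvRunR]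
  | succ k ih =>
    have hr : ((n : Int) - 1 - ((k + 1 : Nat) : Int)) + 1 = (n : Int) - 1 - (k : Int) := by
      push_cast; ring
    rw [pvWhileStemR]
    split_ifs with h
    · have hp := (pvCondR_iff pm n hb ((n : Int) - 1 - ((k + 1 : Nat) : Int))).mp h
      rw [hr] at hp
      rw [hr, ih (by omega)]
      simp only [pvRunR]
      push_cast
      rw [if_pos hp]
      ring
    · have hp : ¬ pvAdj pm ((n : Int) - 1 - (k : Int)) = true := by
        intro hp
        exact h ((pvCondR_iff pm n hb ((n : Int) - 1 - ((k + 1 : Nat) : Int))).mpr (by rw [hr]; exact hp))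
      simp only [pvRunR]
      push_cast
      rw [if_neg hp]
      ring

theorem pvWhileDotR_eq (cs : List Char) (n : Nat) (k : Nat) (hk : k < n) :
    pvWhileDotR cs n ((n : Int) - 1 - k)
      = ((n : Int) - 1 - k) + pvRunR (fun i => PySem.List.pyGet? cs i == some '.') n k := by
  induction k with
  | zero =>
    rw [pvWhileDotR]
    split_ifs with h
    · exfalso; have := h.1; push_cast at this; omega
    · simp [pvRunR]
  | succ k ih =>
    have hr : ((n : Int) - 1 - ((k + 1 : Nat) : Int)) + 1 = (n : Int) - 1 - (k : Int) := by
      push_cast; ring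
    rw [pvWhileDotR]
    split_ifs with h
    · have hp : PySem.List.pyGet? cs ((n : Int) - 1 - (k : Int)) = some '.' := by
        rw [← hr]; exact h.2
      rw [hr, ih (by omega)]
      simp only [pvRunR]
      push_cast
      rw [if_pos (by simpa using hp)]
      ring
    · have hp : ¬ PySem.List.pyGet? cs ((n : Int) - 1 - (k : Int)) = some '.' := by
        intro hp
        exact h ⟨by push_cast; omega, by rw [hr]; exact hp⟩
      simp only [pvRunR]
      push_cast
      rw [if_neg (by simpa using hp)]
      ring

theorem pvCntEqR_eq (cs : List Char) (n : Nat) (k : Nat) (hk : k < n) :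
    pvCntEqR cs n ((n : Int) - 1 - k)
      = pvRunR (fun i => PySem.List.pyGet? cs (i - 1) == PySem.List.pyGet? cs i) n k := by
  induction k with
  | zero =>
    rw [pvCntEqR]
    split_ifs with h
    · exfalso; have := h.1; push_cast at this; omega
    · simp [pvRunR]
  | succ k ih =>
    have hr : ((n : Int) - 1 - ((k + 1 : Nat) : Int)) + 1 = (n : Int) - 1 - (k : Int) := by
      push_cast; ring
    have hpe : ((n : Int) - 1 - (k : Int)) - 1 = (n : Int) - 1 - ((k + 1 : Nat) : Int) := by
      push_cast; ring
    rw [pvCntEqR]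
    split_ifs with h
    · have hp : PySem.List.pyGet? cs ((n : Int) - 1 - ((k + 1 : Nat) : Int))
          = PySem.List.pyGet? cs ((n : Int) - 1 - (k : Int)) := by
        rw [← hr]; exact h.2
      have hp2 : PySem.List.pyGet? cs ((n : Int) - 1 - (k : Int) - 1)
          = PySem.List.pyGet? cs ((n : Int) - 1 - (k : Int)) := by
        rw [show (n : Int) - 1 - (k : Int) - 1 = (n : Int) - 1 - ((k + 1 : Nat) : Int) from by
          push_cast; ring]
        exact hp
      rw [hr, ih (by omega)]
      simp only [pvRunR]
      rw [if_pos (beq_iff_eq.mpr hp2)]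
    · have hp : ¬ PySem.List.pyGet? cs ((n : Int) - 1 - ((k + 1 : Nat) : Int))
          = PySem.List.pyGet? cs ((n : Int) - 1 - (k : Int)) := by
        intro hp
        exact h ⟨by push_cast; omega, by rw [hr]; exact hp⟩
      have hp2 : ¬ PySem.List.pyGet? cs ((n : Int) - 1 - (k : Int) - 1)
          = PySem.List.pyGet? cs ((n : Int) - 1 - (k : Int)) := by
        rw [show (n : Int) - 1 - (k : Int) - 1 = (n : Int) - 1 - ((k + 1 : Nat) : Int) from by
          push_cast; ring]
        exact hp
      simp only [pvRunR]
      rw [if_neg (by simpa using hp2)]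

theorem pvFoldL_spec (cs : List Char) (pm : PySem.Dict Int Int) (m : Nat) :
    (PySem.List.pyRange 0 m 1).foldl (pvStepL cs pm) ((0, 0, 0), ([], [], []))
      = ((pvRunL (pvAdj pm) (m - 1),
          pvRunL (fun i => PySem.List.pyGet? cs (i - 1) == some '.') (m - 1),
          pvRunL (fun i => PySem.List.pyGet? cs i == PySem.List.pyGet? cs (i - 1)) (m - 1)),
         ((List.range m).map (fun k => pvRunL (pvAdj pm) k),
          (List.range m).map (fun k => pvRunL (fun i => PySem.List.pyGet? cs (i - 1) == some '.') k),
          (List.range m).map (fun k => pvRunL (fun i => PySem.List.pyGet? cs i == PySem.List.pyGet? cs (i - 1)) k))) := by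
  induction m with
  | zero => simp [PySem.List.pyRange_one_eq_nil, pvRunL]
  | succ m ihm =>
    rw [show ((m + 1 : Nat) : Int) = (m : Int) + 1 from by push_cast; ring,
      PySem.List.pyRange_one_succ_right (by positivity), List.foldl_append, ihm]
    cases m with
    | zero => simp [pvStepL, pvRunL, List.range_succ]
    | succ k =>
      have h0 : (0 : Int) < ((k + 1 : Nat) : Int) := by push_cast; omega
      simp only [pvStepL, List.foldl_cons, List.foldl_nil, if_pos h0]
      push_cast
      simp [pvRunL, List.range_succ, beq_iff_eq, Nat.succ_sub_one]

theorem pvFoldR_spec (cs : List Char) (pm : PySem.Dict Int Int) (n : Int) (m : Nat) :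
    (PySem.List.pyRange 0 m 1).foldl (pvStepR cs pm n) ((0, 0, 0), ([], [], []))
      = ((pvRunR (pvAdj pm) n (m - 1),
          pvRunR (fun i => PySem.List.pyGet? cs i == some '.') n (m - 1),
          pvRunR (fun i => PySem.List.pyGet? cs (i - 1) == PySem.List.pyGet? cs i) n (m - 1)),
         ((List.range m).map (fun k => pvRunR (pvAdj pm) n k),
          (List.range m).map (fun k => pvRunR (fun i => PySem.List.pyGet? cs i == some '.') n k),
          (List.range m).map (fun k => pvRunR (fun i => PySem.List.pyGet? cs (i - 1) == PySem.List.pyGet? cs i) n k))) := by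
  induction m with
  | zero => simp [PySem.List.pyRange_one_eq_nil, pvRunR]
  | succ m ihm =>
    rw [show ((m + 1 : Nat) : Int) = (m : Int) + 1 from by push_cast; ring,
      PySem.List.pyRange_one_succ_right (by positivity), List.foldl_append, ihm]
    cases m with
    | zero =>
      have hno : ¬ (n - 1 - ((0 : Nat) : Int) < n - 1) := by push_cast; omega
      simp only [pvStepR, List.foldl_cons, List.foldl_nil, Nat.cast_zero, if_neg hno]
      simp [pvRunR, List.range_succ]
    | succ k =>
      have h0 : n - 1 - ((k + 1 : Nat) : Int) < n - 1 := by push_cast; omega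
      simp only [pvStepR, List.foldl_cons, List.foldl_nil, if_pos h0]
      have harg : n - 1 - ((k + 1 : Nat) : Int) + 1 = n - 1 - (k : Int) := by push_cast; ring
      rw [harg]
      have harg2 : n - 1 - ((k : Int) + 1) = n - 1 - (k : Int) - 1 := by ring
      simp only [pvRunR, List.range_succ, beq_iff_eq, Nat.succ_sub_one, Nat.cast_add,
        Nat.cast_one]
      rw [harg2]
      simp [pvRunR, List.range_succ, beq_iff_eq]

-- A's main loop is a fold that appends one value per index: it is a map
theorem pvFoldTriple (l : List Int) (f g h : Int → Int) (a b c : List Int) :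
    l.foldl (fun acc i => (acc.1 ++ [f i], acc.2.1 ++ [g i], acc.2.2 ++ [h i])) (a, b, c)
      = (a ++ l.map f, b ++ l.map g, c ++ l.map h) := by
  induction l generalizing a b c with
  | nil => simp
  | cons x xs ih => simp [List.foldl_cons, ih]

-- ===== VERDICT (by name: the statement is the Claim_ definition above) =====
theorem stem_loop_geometry_spec : Claim_equal_stem_loop_geometry := by
  intro struct _
  have hb := pvPM_bound struct
  have hb2 : ∀ k v, (pvPairedMap struct).get? k = some v → 0 ≤ k ∧ 0 ≤ v :=
    fun k v h => ⟨(hb k v h).1, (hb k v h).2.2.1⟩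
  have hb3 : ∀ k v, (pvPairedMap struct).get? k = some v →
      0 ≤ k ∧ 0 ≤ v ∧ k < (struct.toList.length : Int) :=
    fun k v h => ⟨(hb k v h).1, (hb k v h).2.2.1, (hb k v h).2.1⟩
  unfold Spec_stem_loop_geometry
  simp only [stem_loop_geometry, stem_loop_geometry_alt, pvPairedMapAlt_eq,
    pvFoldL_spec, pvFoldR_spec, pvFoldTriple, List.nil_append]
  simp only [Prod.mk.injEq]
  refine ⟨?_, ?_, ?_⟩
  · -- stem_len
    apply List.map_congr_left
    intro i hi
    rw [PySem.List.mem_pyRange_one] at hi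
    obtain ⟨h0, hlt⟩ := hi
    obtain ⟨k, rfl⟩ : ∃ k : Nat, i = (k : Int) := ⟨i.toNat, (Int.toNat_of_nonneg h0).symm⟩
    have hk : k < struct.toList.length := by exact_mod_cast hlt
    by_cases hc : (pvPairedMap struct).contains (k : Int)
    · rw [if_pos hc, if_pos hc]
      have hgl : PySem.List.pyGetD ((List.range struct.toList.length).map
          (fun j => pvRunL (pvAdj (pvPairedMap struct)) j)) (k : Int) 0
          = pvRunL (pvAdj (pvPairedMap struct)) k := by
        rw [PySem.List.pyGetD_natCast, List.getD_eq_getElem _ _ (by simpa using hk)]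
        simp
      have hgr : PySem.List.pyGetD (((List.range struct.toList.length).map
          (fun j => pvRunR (pvAdj (pvPairedMap struct)) (struct.toList.length : Int) j)).reverse)
          (k : Int) 0
          = pvRunR (pvAdj (pvPairedMap struct)) (struct.toList.length : Int)
              (struct.toList.length - 1 - k) := by
        rw [PySem.List.pyGetD_natCast, List.getD_eq_getElem _ _ (by simpa using hk),
          List.getElem_reverse]
        simp
      rw [hgl, hgr, pvWhileStemL_eq _ hb2 k]
      have hR := pvWhileStemR_eq (pvPairedMap struct) struct.toList.length hb3
        (struct.toList.length - 1 - k) (by omega)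
      rw [show ((struct.toList.length : Int) - 1 - ((struct.toList.length - 1 - k : Nat) : Int))
          = (k : Int) from by omega] at hR
      rw [hR]
      ring
    · rw [if_neg hc, if_neg hc]
  · -- loop_len
    apply List.map_congr_left
    intro i hi
    rw [PySem.List.mem_pyRange_one] at hi
    obtain ⟨h0, hlt⟩ := hi
    obtain ⟨k, rfl⟩ : ∃ k : Nat, i = (k : Int) := ⟨i.toNat, (Int.toNat_of_nonneg h0).symm⟩
    have hk : k < struct.toList.length := by exact_mod_cast hlt
    by_cases hc : (pvPairedMap struct).contains (k : Int)
    · rw [if_pos hc, if_pos hc]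
    · rw [if_neg hc, if_neg hc]
      have hgl : PySem.List.pyGetD ((List.range struct.toList.length).map
          (fun j => pvRunL (fun i => PySem.List.pyGet? struct.toList (i - 1) == some '.') j))
          (k : Int) 0
          = pvRunL (fun i => PySem.List.pyGet? struct.toList (i - 1) == some '.') k := by
        rw [PySem.List.pyGetD_natCast, List.getD_eq_getElem _ _ (by simpa using hk)]
        simp
      have hgr : PySem.List.pyGetD (((List.range struct.toList.length).map
          (fun j => pvRunR (fun i => PySem.List.pyGet? struct.toList i == some '.')
            (struct.toList.length : Int) j)).reverse) (k : Int) 0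
          = pvRunR (fun i => PySem.List.pyGet? struct.toList i == some '.')
              (struct.toList.length : Int) (struct.toList.length - 1 - k) := by
        rw [PySem.List.pyGetD_natCast, List.getD_eq_getElem _ _ (by simpa using hk),
          List.getElem_reverse]
        simp
      rw [hgl, hgr, pvWhileDotL_eq struct.toList k]
      have hR := pvWhileDotR_eq struct.toList struct.toList.length
        (struct.toList.length - 1 - k) (by omega)
      rw [show ((struct.toList.length : Int) - 1 - ((struct.toList.length - 1 - k : Nat) : Int))
          = (k : Int) from by omega] at hR
      rw [hR]
      ring
  · -- dist_junc
    apply List.map_congr_left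
    intro i hi
    rw [PySem.List.mem_pyRange_one] at hi
    obtain ⟨h0, hlt⟩ := hi
    obtain ⟨k, rfl⟩ : ∃ k : Nat, i = (k : Int) := ⟨i.toNat, (Int.toNat_of_nonneg h0).symm⟩
    have hk : k < struct.toList.length := by exact_mod_cast hlt
    have hgl : PySem.List.pyGetD ((List.range struct.toList.length).map
        (fun j => pvRunL (fun i => PySem.List.pyGet? struct.toList i
          == PySem.List.pyGet? struct.toList (i - 1)) j)) (k : Int) 0
        = pvRunL (fun i => PySem.List.pyGet? struct.toList i
            == PySem.List.pyGet? struct.toList (i - 1)) k := by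
      rw [PySem.List.pyGetD_natCast, List.getD_eq_getElem _ _ (by simpa using hk)]
      simp
    have hgr : PySem.List.pyGetD (((List.range struct.toList.length).map
        (fun j => pvRunR (fun i => PySem.List.pyGet? struct.toList (i - 1)
          == PySem.List.pyGet? struct.toList i) (struct.toList.length : Int) j)).reverse)
        (k : Int) 0
        = pvRunR (fun i => PySem.List.pyGet? struct.toList (i - 1)
            == PySem.List.pyGet? struct.toList i) (struct.toList.length : Int)
            (struct.toList.length - 1 - k) := by
      rw [PySem.List.pyGetD_natCast, List.getD_eq_getElem _ _ (by simpa using hk),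
        List.getElem_reverse]
      simp
    rw [hgl, hgr, pvCntEqL_eq struct.toList k]
    have hR := pvCntEqR_eq struct.toList struct.toList.length
      (struct.toList.length - 1 - k) (by omega)
    rw [show ((struct.toList.length : Int) - 1 - ((struct.toList.length - 1 - k : Nat) : Int))
        = (k : Int) from by omega] at hR
    rw [hR]
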